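-- pv_equiv track=rewrite | github.com/MiniMECHlg/Simple-Caeser-cipher | main.py | advanced_shift
-- ===== SOURCE A (Python) =====
-- def split(word):
--     return [char for char in word]
--
-- def join(wordList):
--     word = ""
--     for char in range (len(wordList)):
--         word += wordList[char]
--     return word
--
-- def advanced_shift(shiftText, shiftNum):
--     encyptedText = ""
--     char = 0
--     while char != (len(shiftText)):
--         if (char % 5) == 0 and (char != 0):
--             #split the text, add a space, rejoin the text
--             textArray = split(shiftText)
--             textArray.insert(char, " ")
--             shiftText = join(textArray)
--
--         if (ord(shiftText[char]) >= 65 and ord(shiftText[char]) <= 90):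
--             caps = True
--             letterValue = ord(shiftText[char])
--             letterValue -= 64 #This gets A to 1 this means we can tell which value this should be
--             newValue = letterValue + shiftNum
--
--             div = newValue//26 #used to see if the letter should be a negative or positive
--             newValue = newValue%26 #used to find what the letter should be
--
--             if newValue == 0:
--                 newValue += 90
--             elif div%2 == 0: #if it is even it needs to be a cap
--                 newValue += 64
--             else: #if odd it needs to be a lowercase
--                 newValue += 96
--
--             encyptedText += chr(newValue)
--
--         elif (ord(shiftText[char]) >= 97 and ord(shiftText[char]) <= 122):
--             caps = False
--             letterValue = ord(shiftText[char])
--             letterValue -= 96  # This gets A to 1 this means we can tell which value this should be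
--             newValue = letterValue + shiftNum
--
--             div = newValue//26 #used to see if the letter should be a negative or positive
--             newValue = newValue%26 #used to find what the letter should be
--
--             if newValue == 0:
--                 newValue += 122
--             elif div%2 == 1: #if it is odd it needs to be a cap
--                 newValue += 64
--             else: #if even it has to be a lower case
--                 newValue += 96
--
--             encyptedText += chr(newValue)
--
--         elif (ord(shiftText[char]) == 32): #If there is a space add a space
--             encyptedText += " "
--
--         #This will remove any punctuation as there will be no punctuation added to encyrptedText
--
--         char += 1
--
--     return encyptedText
-- ===== SOURCE B (Python) =====
-- def advanced_shift(shiftText, shiftNum):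
--     # One pass over the original text: emit a space before positions 5, 9, 13, ...
--     # and encrypt each letter by a closed-form mod-52 rule (the residue mod 52 encodes
--     # both the letter mod 26 and the parity of A's quotient).
--     out = []
--     for i, c in enumerate(shiftText):
--         if i >= 5 and (i - 5) % 4 == 0:
--             out.append(" ")
--         o = ord(c)
--         if 65 <= o <= 90:
--             t = (o - 64 + shiftNum) % 52
--             out.append("Z" if t % 26 == 0 else chr(t + 64) if t < 26 else chr(t + 70))
--         elif 97 <= o <= 122:
--             t = (o - 96 + shiftNum) % 52
--             out.append("z" if t % 26 == 0 else chr(t + 96) if t < 26 else chr(t + 38))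
--         elif o == 32:
--             out.append(" ")
--     return "".join(out)
-- ===== Notes on version B (the rewrite author's own statement) =====
-- stated objective: faster
-- what changed: A re-splits the whole evolving string, inserts a space and re-joins it at every 5th position inside its character scan (quadratic) and picks the output case from the quotient's parity; B makes one enumerated pass over the original text, emitting a space before positions 5, 9, 13, ... and encrypting each letter by a closed-form mod-52 rule whose residue encodes both the shifted letter and the case flip.
import Mathlib
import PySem

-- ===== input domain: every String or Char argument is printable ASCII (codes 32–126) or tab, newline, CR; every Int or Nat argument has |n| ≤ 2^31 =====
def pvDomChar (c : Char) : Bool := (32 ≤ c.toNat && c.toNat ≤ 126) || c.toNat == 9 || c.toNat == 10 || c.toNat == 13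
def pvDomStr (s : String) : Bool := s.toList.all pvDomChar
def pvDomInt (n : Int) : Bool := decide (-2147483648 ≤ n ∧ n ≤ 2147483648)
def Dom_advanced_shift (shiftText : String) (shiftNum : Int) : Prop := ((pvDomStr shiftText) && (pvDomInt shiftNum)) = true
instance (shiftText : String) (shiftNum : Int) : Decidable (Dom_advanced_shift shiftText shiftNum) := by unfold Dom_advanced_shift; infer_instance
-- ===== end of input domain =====

-- B replaces A's quadratic re-split/insert/re-join loop over the evolving string by a single
-- enumerated pass over the original text (a space is emitted before positions 5, 9, 13, …) and
-- replaces A's quotient/parity case analysis by a closed-form mod-52 rule per letter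
-- (objective: faster, measured).

-- ===== PORT A =====
-- A's per-character branch bodies (the if-chain inside A's while loop, verbatim);
-- [] is the fall-through (punctuation appends nothing).
def pieceA (shiftNum : Int) (c : Char) : List Char :=
  if 65 ≤ c.toNat ∧ c.toNat ≤ 90 then
    let letterValue : Int := (c.toNat : Int) - 64
    let newValue := letterValue + shiftNum
    let div := PySem.Int.floordiv newValue 26
    let newValue := PySem.Int.mod newValue 26
    if newValue = 0 then [Char.ofNat (newValue + 90).toNat]
    else if PySem.Int.mod div 2 = 0 then [Char.ofNat (newValue + 64).toNat]
    else [Char.ofNat (newValue + 96).toNat]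
  else if 97 ≤ c.toNat ∧ c.toNat ≤ 122 then
    let letterValue : Int := (c.toNat : Int) - 96
    let newValue := letterValue + shiftNum
    let div := PySem.Int.floordiv newValue 26
    let newValue := PySem.Int.mod newValue 26
    if newValue = 0 then [Char.ofNat (newValue + 122).toNat]
    else if PySem.Int.mod div 2 = 1 then [Char.ofNat (newValue + 64).toNat]
    else [Char.ofNat (newValue + 96).toNat]
  else if c.toNat = 32 then [' ']
  else []

-- A's while loop: the evolving string, the position, the accumulator.  The fuel argument is a
-- pure totality guard (each iteration strictly decreases 2*(len-char)+[char%5=0], which starts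
-- at 2*len+1); the `none` branch of pyGet? is an unreachable IndexError guard.
def loopA (shiftNum : Int) : Nat → List Char → Nat → List Char → List Char
  | 0, _, _, enc => enc
  | fuel + 1, s, char, enc =>
    if char = s.length then enc
    else
      match PySem.List.pyGet?
          (if char % 5 = 0 ∧ char ≠ 0 then PySem.List.insert s (char : Int) ' ' else s)
          (char : Int) with
      | none => enc
      | some c =>
          loopA shiftNum fuel
            (if char % 5 = 0 ∧ char ≠ 0 then PySem.List.insert s (char : Int) ' ' else s)
            (char + 1) (enc ++ pieceA shiftNum c)

def advanced_shift (shiftText : String) (shiftNum : Int) : String :=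
  String.ofList (loopA shiftNum (2 * shiftText.toList.length + 1) shiftText.toList 0 [])

-- ===== PORT B =====
-- B's closed-form per-letter rule: the residue t = (letterValue + shift) mod 52 encodes both
-- the letter (t mod 26) and the case flip (t < 26 or not).
def encB (shiftNum : Int) (c : Char) : List Char :=
  if 65 ≤ c.toNat ∧ c.toNat ≤ 90 then
    let t := PySem.Int.mod ((c.toNat : Int) - 64 + shiftNum) 52
    if PySem.Int.mod t 26 = 0 then ['Z']
    else if t < 26 then [Char.ofNat (t + 64).toNat]
    else [Char.ofNat (t + 70).toNat]
  else if 97 ≤ c.toNat ∧ c.toNat ≤ 122 then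
    let t := PySem.Int.mod ((c.toNat : Int) - 96 + shiftNum) 52
    if PySem.Int.mod t 26 = 0 then ['z']
    else if t < 26 then [Char.ofNat (t + 96).toNat]
    else [Char.ofNat (t + 38).toNat]
  else if c.toNat = 32 then [' ']
  else []

-- B's single enumerated pass: a space before original positions 5, 9, 13, …, then the
-- encryption of the character itself.
def advanced_shift_alt (shiftText : String) (shiftNum : Int) : String :=
  String.ofList ((PySem.List.enumerate shiftText.toList 0).flatMap (fun p =>
    (if 5 ≤ p.1 ∧ PySem.Int.mod (p.1 - 5) 4 = 0 then [' '] else []) ++ encB shiftNum p.2))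

-- ===== PRECONDITION & SPEC =====
def Spec_advanced_shift (shiftText : String) (shiftNum : Int) (out : String) : Prop := out = advanced_shift_alt shiftText shiftNum
instance (shiftText : String) (shiftNum : Int) (out : String) : Decidable (Spec_advanced_shift shiftText shiftNum out) := by unfold Spec_advanced_shift; infer_instance

-- ===== CLAIM (what is proved, stated in full; the proofs are below) =====
def Claim_equal_advanced_shift : Prop := ∀ (shiftText : String) (shiftNum : Int), Dom_advanced_shift shiftText shiftNum → Spec_advanced_shift shiftText shiftNum (advanced_shift shiftText shiftNum)

-- ===== LEMMAS AND PROOFS =====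

-- The mod-52 rule agrees with A's quotient/parity analysis: uppercase core.
theorem keyU (x : Int) :
    (if x % 26 = 0 then [Char.ofNat (x % 26 + 90).toNat]
     else if (x / 26) % 2 = 0 then [Char.ofNat (x % 26 + 64).toNat]
     else [Char.ofNat (x % 26 + 96).toNat])
    = (if x % 52 % 26 = 0 then ['Z']
       else if x % 52 < 26 then [Char.ofNat (x % 52 + 64).toNat]
       else [Char.ofNat (x % 52 + 70).toNat]) := by
  by_cases h0 : x % 26 = 0
  · rw [if_pos h0, if_pos (show x % 52 % 26 = 0 by omega), h0]
    decide
  · rw [if_neg h0, if_neg (show ¬ x % 52 % 26 = 0 by omega)]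
    by_cases h2 : (x / 26) % 2 = 0
    · have h3 : x % 52 = x % 26 := by omega
      rw [if_pos h2, if_pos (show x % 52 < 26 by omega), h3]
    · have h3 : x % 52 = x % 26 + 26 := by omega
      rw [if_neg h2, if_neg (show ¬ x % 52 < 26 by omega), h3,
          show x % 26 + 26 + 70 = x % 26 + 96 by ring]

-- ... lowercase core.
theorem keyL (x : Int) :
    (if x % 26 = 0 then [Char.ofNat (x % 26 + 122).toNat]
     else if (x / 26) % 2 = 1 then [Char.ofNat (x % 26 + 64).toNat]
     else [Char.ofNat (x % 26 + 96).toNat])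
    = (if x % 52 % 26 = 0 then ['z']
       else if x % 52 < 26 then [Char.ofNat (x % 52 + 96).toNat]
       else [Char.ofNat (x % 52 + 38).toNat]) := by
  by_cases h0 : x % 26 = 0
  · rw [if_pos h0, if_pos (show x % 52 % 26 = 0 by omega), h0]
    decide
  · rw [if_neg h0, if_neg (show ¬ x % 52 % 26 = 0 by omega)]
    by_cases h2 : (x / 26) % 2 = 1
    · have h3 : x % 52 = x % 26 + 26 := by omega
      rw [if_pos h2, if_neg (show ¬ x % 52 < 26 by omega), h3,
          show x % 26 + 26 + 38 = x % 26 + 64 by ring]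
    · have h3 : x % 52 = x % 26 := by omega
      rw [if_neg h2, if_pos (show x % 52 < 26 by omega), h3]

-- A's per-character pieces equal B's closed-form encryption.
theorem pieceA_eq_encB (n : Int) (c : Char) : pieceA n c = encB n c := by
  have m26 : ∀ a : Int, PySem.Int.mod a 26 = a % 26 :=
    fun a => PySem.Int.mod_eq_emod_of_pos (by norm_num)
  have m52 : ∀ a : Int, PySem.Int.mod a 52 = a % 52 :=
    fun a => PySem.Int.mod_eq_emod_of_pos (by norm_num)
  have m2 : ∀ a : Int, PySem.Int.mod a 2 = a % 2 :=
    fun a => PySem.Int.mod_eq_emod_of_pos (by norm_num)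
  have d26 : ∀ a : Int, PySem.Int.floordiv a 26 = a / 26 :=
    fun a => PySem.Int.floordiv_eq_ediv_of_pos (by norm_num)
  by_cases hU : 65 ≤ c.toNat ∧ c.toNat ≤ 90
  · simp only [pieceA, encB, if_pos hU, m26, m52, m2, d26]
    exact keyU ((c.toNat : Int) - 64 + n)
  · by_cases hL : 97 ≤ c.toNat ∧ c.toNat ≤ 122
    · simp only [pieceA, encB, if_neg hU, if_pos hL, m26, m52, m2, d26]
      exact keyL ((c.toNat : Int) - 96 + n)
    · simp only [pieceA, encB, if_neg hU, if_neg hL]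

-- The grouped text as A incrementally produces it: `spread k l` is the still-unprocessed part of
-- the grouped text when k original characters remain before the next inserted space.
def spread : Nat → List Char → List Char
  | _, [] => []
  | 0, c :: t => ' ' :: c :: spread 3 t
  | j + 1, c :: t => c :: spread j t

-- Main invariant: at position char = pre.length (char ≠ 0), with k characters to go before the
-- next space insertion ((pre.length + k) % 5 = 0, k < 5), and fuel at least the loop's decreasing
-- measure, A's loop appends the encryption of `spread k rest`.
theorem loopA_inv (n : Int) : ∀ (m : Nat) (rest pre enc : List Char) (k : Nat),
    2 * rest.length + (if k = 0 then 1 else 0) ≤ m → k < 5 → (pre.length + k) % 5 = 0 →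
    pre.length ≠ 0 →
    loopA n m (pre ++ rest) pre.length enc = enc ++ (spread k rest).flatMap (pieceA n) := by
  intro m
  induction m with
  | zero =>
    intro rest pre enc k hm hk hmod hne
    cases rest with
    | nil => simp [loopA, spread]
    | cons c t => simp at hm
  | succ m ih =>
    intro rest pre enc k hm hk hmod hne
    cases rest with
    | nil => simp [loopA, spread]
    | cons c t =>
      have hlen : ¬ (pre.length = (pre ++ c :: t).length) := by simp
      cases k with
      | zero =>
        have hc : pre.length % 5 = 0 := by omega
        have hcond : pre.length % 5 = 0 ∧ pre.length ≠ 0 := ⟨hc, hne⟩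
        have hins : PySem.List.insert (pre ++ c :: t) ((pre.length : Nat) : Int) ' '
            = pre ++ ' ' :: c :: t := by
          rw [PySem.List.insert_natCast _ _ _ (by simp)]
          simp
        rw [loopA, if_neg hlen, if_pos hcond, hins, PySem.List.pyGet?_append_length]
        have hrec := ih (c :: t) (pre ++ [' ']) (enc ++ pieceA n ' ') 4
          (by simp at hm ⊢; omega) (by omega) (by simp; omega) (by simp)
        simp only [List.append_assoc, List.singleton_append, List.length_append,
          List.length_cons, List.length_nil] at hrec
        show loopA n m (pre ++ ' ' :: c :: t) (pre.length + 1) (enc ++ pieceA n ' ')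
            = enc ++ (spread 0 (c :: t)).flatMap (pieceA n)
        rw [hrec]
        simp only [spread, List.flatMap_cons]
      | succ k' =>
        have hc : ¬ (pre.length % 5 = 0 ∧ pre.length ≠ 0) := by
          intro ⟨h1, _⟩; omega
        rw [loopA, if_neg hlen, if_neg hc, PySem.List.pyGet?_append_length]
        have hrec := ih t (pre ++ [c]) (enc ++ pieceA n c) k'
          (by split_ifs at hm ⊢ <;> simp at hm ⊢ <;> omega) (by omega) (by simp; omega)
          (by simp)
        simp only [List.append_assoc, List.singleton_append, List.length_append,
          List.length_cons, List.length_nil] at hrec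
        show loopA n m (pre ++ c :: t) (pre.length + 1) (enc ++ pieceA n c)
            = enc ++ (spread (k' + 1) (c :: t)).flatMap (pieceA n)
        rw [hrec]
        simp only [spread, List.flatMap_cons]

-- The spread view of A's output equals B's enumerated pass: k and the enumeration index i
-- are linked by the stated invariant (k = characters left before the next inserted space).
theorem spread_enum (n : Int) : ∀ (l : List Char) (i k : Nat),
    ((i ≤ 5 ∧ i + k = 5) ∨ (5 < i ∧ k ≤ 3 ∧ (i - 5 + k) % 4 = 0)) →
    (spread k l).flatMap (pieceA n) =
      (PySem.List.enumerate l (i : Int)).flatMap (fun p =>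
        (if 5 ≤ p.1 ∧ PySem.Int.mod (p.1 - 5) 4 = 0 then [' '] else []) ++ encB n p.2) := by
  intro l
  induction l with
  | nil => intro i k _; simp [spread.eq_def, PySem.List.enumerate_nil]
  | cons c t ih =>
    intro i k hik
    rw [PySem.List.enumerate_cons]
    cases k with
    | zero =>
      have hi5 : 5 ≤ i ∧ (i - 5) % 4 = 0 := by omega
      have hg : (5 ≤ (i : Int) ∧ PySem.Int.mod ((i : Int) - 5) 4 = 0) := by
        rw [PySem.Int.mod_eq_emod_of_pos (by norm_num)]
        omega
      have hrec := ih (i + 1) 3 (by omega)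
      push_cast at hrec
      simp only [spread, List.flatMap_cons, hrec, if_pos hg]
      have hsp : pieceA n ' ' = [' '] := rfl
      rw [hsp, pieceA_eq_encB]
      simp
    | succ j =>
      have hg : ¬ (5 ≤ (i : Int) ∧ PySem.Int.mod ((i : Int) - 5) 4 = 0) := by
        rw [PySem.Int.mod_eq_emod_of_pos (by norm_num)]
        omega
      have hrec := ih (i + 1) j (by omega)
      push_cast at hrec
      simp only [spread, List.flatMap_cons, hrec, if_neg hg]
      rw [pieceA_eq_encB]
      simp

-- ===== VERDICT (by name: the statement is the Claim_ definition above) =====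
theorem advanced_shift_spec : Claim_equal_advanced_shift := by
  unfold Claim_equal_advanced_shift
  intro s n _
  unfold Spec_advanced_shift advanced_shift advanced_shift_alt
  congr 1
  cases hl : s.toList with
  | nil => simp [loopA, PySem.List.enumerate_nil]
  | cons c t =>
    have h0 : ¬ ((0 : Nat) = (c :: t).length) := by simp
    have hc0 : ¬ ((0 : Nat) % 5 = 0 ∧ (0 : Nat) ≠ 0) := by simp
    have hstep : loopA n (2 * (c :: t).length + 1) (c :: t) 0 []
        = loopA n (2 * (c :: t).length) (c :: t) (0 + 1) ([] ++ pieceA n c) := by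
      rw [loopA, if_neg h0, if_neg hc0]
      simp only [Nat.cast_zero, PySem.List.pyGet?_zero_cons]
    rw [hstep]
    have hrec := loopA_inv n (2 * (c :: t).length) t [c] ([] ++ pieceA n c) 4
      (by simp) (by omega) (by simp) (by simp)
    simp only [List.singleton_append, List.nil_append, List.length_cons,
      List.length_nil, Nat.zero_add] at hrec
    simp only [List.nil_append, List.length_cons]
    rw [hrec]
    rw [PySem.List.enumerate_cons, List.flatMap_cons]
    have hg : ¬ (5 ≤ (0 : Int) ∧ PySem.Int.mod ((0 : Int) - 5) 4 = 0) := by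
      rw [PySem.Int.mod_eq_emod_of_pos (by norm_num)]; omega
    rw [if_neg hg]
    have hse := spread_enum n t 1 4 (by omega)
    push_cast at hse
    rw [hse, pieceA_eq_encB]
    simp
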